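-- pv_equiv track=rewrite | github.com/Mohsen-Amr-Ali/Quine-McCluskey-PI-Finder | Python/PI-FInder.py | SOP_to_minterms
-- ===== SOURCE A (Python) =====
-- def SOP_to_minterms(terms, vars): #convert fubction in terms of a & a' to a list that's the sum of minterms
--     all_minterms = []
--
--     for term in terms: #loop over all terms
--         fixed = {}
--
--         i = 0
--         while i<len(term):
--             var = term[i]
--             if i + 1 < len(term) and term[i + 1] == "'":
--                fixed[var] = 0 #complements
--                i += 2 #term and the ' after it
--             else:
--                 fixed[var] = 1
--                 i += 1
--
--         missing = [v for v in vars if v not in fixed]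
--
--         def generate_combos(n): #for the missing variables, create all possible combinations
--             combos = []
--             for i in range(2 ** n):
--                 combo = []
--                 for j in range(n - 1, -1, -1):
--                     combo.append((i >> j) & 1)
--                 combos.append(combo) #list of list of ones and zeors lol
--             return combos
--
--         combos = generate_combos(len(missing)) # call the function for the variables missing in this particular term el e7na feeh
--
--         for combo in combos: #loop over kol el combos
--             full_binary = []
--             combo_index = 0
--             for v in vars: #loop over kol el vars
--                 if v in fixed: #law howa already in the list of variables, add it 3ala tool
--                     full_binary.append(fixed[v])
--                 else:
--                     full_binary.append(combo[combo_index]) #otherwise add the combo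
--                     combo_index += 1
--
--             minterm = 0
--             for bit in full_binary:
--                 minterm = (minterm << 1) | bit  # Left shift and add bit to build the binary number
--             all_minterms.append(minterm)
--
--     return sorted(set(all_minterms))
-- ===== SOURCE B (Python) =====
-- def SOP_to_minterms(terms, vars_):  # 'vars_': the builtin name 'vars' is disallowed here; positional signature unchanged
--     # Generate-and-test: instead of expanding each term's free variables into
--     # combinations, parse each term once into bit constraints (shift, value),
--     # then scan every candidate minterm 0..2**n-1 and keep those matching some
--     # term's constraints; the result comes out sorted and deduplicated for free.
--     n = len(vars_)
--     constraints = []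
--     for term in terms:
--         fixed = {}
--         i = 0
--         while i < len(term):
--             var = term[i]
--             if i + 1 < len(term) and term[i + 1] == "'":
--                 fixed[var] = 0
--                 i += 2
--             else:
--                 fixed[var] = 1
--                 i += 1
--         constraints.append([(n - 1 - idx, fixed[v])
--                             for idx, v in enumerate(vars_) if v in fixed])
--     return [m for m in range(2 ** n)
--             if any(all(((m >> s) & 1) == b for s, b in cons)
--                    for cons in constraints)]
-- ===== Notes on version B (the rewrite author's own statement) =====
-- stated objective: alternative
-- what changed: A expands each term by enumerating all 2^f assignments of its free variables, rebuilds each minterm bit by bit, and finally sorts the deduplicated union; B inverts this into generate-and-test: it compiles each term into bit constraints (shift, value) and scans every candidate minterm 0..2^n-1 once, keeping those satisfying some term's constraints, which yields the sorted duplicate-free list directly with no set or sort.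
import Mathlib
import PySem

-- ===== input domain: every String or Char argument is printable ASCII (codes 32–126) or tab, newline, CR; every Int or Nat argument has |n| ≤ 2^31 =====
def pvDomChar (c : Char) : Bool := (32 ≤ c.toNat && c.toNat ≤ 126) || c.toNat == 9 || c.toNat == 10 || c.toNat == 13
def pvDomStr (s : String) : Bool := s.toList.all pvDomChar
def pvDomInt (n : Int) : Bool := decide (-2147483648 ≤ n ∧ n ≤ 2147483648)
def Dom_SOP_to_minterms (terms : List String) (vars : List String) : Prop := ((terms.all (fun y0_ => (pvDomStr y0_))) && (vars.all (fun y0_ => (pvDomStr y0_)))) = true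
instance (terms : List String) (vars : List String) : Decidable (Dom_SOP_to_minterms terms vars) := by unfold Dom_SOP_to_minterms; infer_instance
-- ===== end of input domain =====

-- B replaces A's expand-each-term-and-sort algorithm by generate-and-test: each term is
-- compiled to bit constraints and every candidate minterm 0..2^n-1 is scanned once
-- (objective: alternative algorithm, same behaviour).

-- ===== PORT A =====

-- the term-parsing while-loop (identical source in A and B): term[i], with a following
-- "'" meaning complement; dict keyed by the one-character string term[i]
def pvParse : List Char → PySem.Dict String Int → PySem.Dict String Int
  | [], d => d
  | c :: '\'' :: rest, d => pvParse rest (d.insert (String.singleton c) 0)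
  | c :: rest, d => pvParse rest (d.insert (String.singleton c) 1)

-- the inner combo built for counter i: j runs n-1,...,0, i.e. j = n-1-k for k = 0..n-1;
-- (i >> j) & 1 = (i >>> j) % 2
def pvComboList (n : Nat) (i : Nat) : List Int :=
  (List.range n).map (fun k => (((i >>> (n - 1 - k)) % 2 : Nat) : Int))

-- generate_combos n: i runs over range(2**n) (always nonnegative, so as Nat)
def pvCombos (n : Nat) : List (List Int) :=
  (List.range (2 ^ n)).map (pvComboList n)

-- the full_binary loop: combo_index advancing = consuming the combo list head by head
-- (headD 0 is never the default case on reachable inputs: the combo is long enough)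
def pvFull (fixed : PySem.Dict String Int) : List String → List Int → List Int
  | [], _ => []
  | v :: vs, combo =>
    match fixed.get? v with
    | some b => b :: pvFull fixed vs combo
    | none => combo.headD 0 :: pvFull fixed vs combo.tail

def SOP_to_minterms (terms : List String) (vars : List String) : List Int :=
  let all := terms.foldl (fun acc term =>
    let fixed := pvParse term.toList PySem.Dict.empty
    let missing := vars.filter (fun v => !(fixed.contains v))
    let combos := pvCombos missing.length
    -- (minterm << 1) | bit = minterm * 2 + bit: minterm stays nonnegative, so the
    -- or'ed-in low bit of minterm*2 is free — exact here
    acc ++ combos.map (fun combo =>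
      (pvFull fixed vars combo).foldl (fun m b => m * 2 + b) 0)) []
  PySem.List.sorted (PySem.Set.ofList all) (fun x => x) false

-- ===== PORT B =====

-- Source B's constraint compilation: [(n-1-idx, fixed[v]) for idx, v in enumerate(vars)
-- if v in fixed]; the shift n-1-idx is the length of the suffix after position idx
def pvCons (fixed : PySem.Dict String Int) : List String → List (Nat × Int)
  | [] => []
  | v :: vs =>
    match fixed.get? v with
    | some b => (vs.length, b) :: pvCons fixed vs
    | none => pvCons fixed vs

-- all(((m >> s) & 1) == b for s, b in cons); (m >> s) & 1 = (m >>> s) % 2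
def pvMatch (m : Nat) (cons : List (Nat × Int)) : Bool :=
  cons.all (fun sb => (((m >>> sb.1) % 2 : Nat) : Int) == sb.2)

def SOP_to_minterms_alt (terms : List String) (vars : List String) : List Int :=
  let constraints := terms.map (fun term => pvCons (pvParse term.toList PySem.Dict.empty) vars)
  ((List.range (2 ^ vars.length)).filter
      (fun m => constraints.any (fun cons => pvMatch m cons))).map (fun m : Nat => (m : Int))

-- ===== PRECONDITION & SPEC =====
def Spec_SOP_to_minterms (terms : List String) (vars : List String) (out : List Int) : Prop := out = SOP_to_minterms_alt terms vars
instance (terms : List String) (vars : List String) (out : List Int) : Decidable (Spec_SOP_to_minterms terms vars out) := by unfold Spec_SOP_to_minterms; infer_instance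

-- ===== CLAIM (what is proved, stated in full; the proofs are below) =====
def Claim_equal_SOP_to_minterms : Prop := ∀ (terms : List String) (vars : List String), Dom_SOP_to_minterms terms vars → Spec_SOP_to_minterms terms vars (SOP_to_minterms terms vars)

-- ===== LEMMAS AND PROOFS =====

-- parsed dicts only hold 0/1 values
theorem pvParse_val01 : ∀ (cs : List Char) (d : PySem.Dict String Int),
    (∀ k x, d.get? k = some x → x = 0 ∨ x = 1) →
    ∀ k x, (pvParse cs d).get? k = some x → x = 0 ∨ x = 1 := by
  intro cs d
  induction cs, d using pvParse.induct with
  | case1 d => exact fun hd => hd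
  | case2 c rest d ih =>
    intro hd
    simp only [pvParse]
    refine ih ?_
    intro k x h
    rw [PySem.Dict.get?_insert] at h
    split at h
    · injection h with h'; omega
    · exact hd _ _ h
  | case3 c rest d hne ih =>
    intro hd
    simp only [pvParse]
    refine ih ?_
    intro k x h
    rw [PySem.Dict.get?_insert] at h
    split at h
    · injection h with h'; omega
    · exact hd _ _ h

-- the MSB-first binary value of the interleaved fixed/free bit string, recursively
def pvVal (fixed : PySem.Dict String Int) : List String → List Int → Int
  | [], _ => 0
  | v :: vs, combo =>
    match fixed.get? v with
    | some b => b * 2 ^ vs.length + pvVal fixed vs combo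
    | none => combo.headD 0 * 2 ^ vs.length + pvVal fixed vs combo.tail

theorem pvFull_foldl (fixed : PySem.Dict String Int) (vars : List String) :
    ∀ (combo : List Int) (acc : Int),
      (pvFull fixed vars combo).foldl (fun m b => m * 2 + b) acc
        = acc * 2 ^ vars.length + pvVal fixed vars combo := by
  induction vars with
  | nil => intro combo acc; simp [pvFull, pvVal]
  | cons v vs ih =>
    intro combo acc
    simp only [pvFull, pvVal, List.length_cons]
    cases h : fixed.get? v with
    | some b => simp only [List.foldl_cons, ih, pow_succ]; ring
    | none => simp only [List.foldl_cons, ih, pow_succ]; ring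

theorem pvComboList_succ (m i : Nat) :
    pvComboList (m + 1) i = (((i >>> m) % 2 : Nat) : Int) :: pvComboList m i := by
  unfold pvComboList
  rw [List.range_succ_eq_map, List.map_cons, List.map_map]
  refine congrArg₂ _ (by simp) ?_
  apply List.map_congr_left
  intro k hk
  simp only [Function.comp_apply]
  have h : m + 1 - 1 - (k + 1) = m - 1 - k := by omega
  rw [h]

-- low bit s < L of c*2^L + r is the bit of r (r < 2^L)
theorem pvBit (c L s r : Nat) (hs : s < L) (_hr : r < 2 ^ L) :
    ((c * 2 ^ L + r) >>> s) % 2 = (r >>> s) % 2 := by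
  have hL : 2 ^ L = 2 ^ (L - s) * 2 ^ s := by rw [← pow_add]; congr 1; omega
  have h0 : 0 < 2 ^ s := Nat.two_pow_pos s
  rw [Nat.shiftRight_eq_div_pow, Nat.shiftRight_eq_div_pow, hL]
  have h1 : c * (2 ^ (L - s) * 2 ^ s) + r = r + c * 2 ^ (L - s) * 2 ^ s := by ring
  rw [h1, Nat.add_mul_div_right _ _ h0]
  have heven : 2 ∣ c * 2 ^ (L - s) := by
    have : 2 ^ (L - s) = 2 * 2 ^ (L - s - 1) := by rw [← pow_succ']; congr 1; omega
    exact ⟨c * 2 ^ (L - s - 1), by rw [this]; ring⟩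
  omega

-- the high bit: (h*2^L + r) >>> L = h for r < 2^L
theorem pvHigh (h L r : Nat) (hr : r < 2 ^ L) : (h * 2 ^ L + r) >>> L = h := by
  have h0 : 0 < 2 ^ L := Nat.two_pow_pos L
  rw [Nat.shiftRight_eq_div_pow]
  have h1 : h * 2 ^ L + r = r + h * 2 ^ L := by ring
  rw [h1, Nat.add_mul_div_right _ _ h0, Nat.div_eq_of_lt hr]
  omega

-- all shifts in a constraint list are below the variable count
theorem pvCons_shift_lt (fixed : PySem.Dict String Int) :
    ∀ (vars : List String), ∀ sb ∈ pvCons fixed vars, sb.1 < vars.length := by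
  intro vars
  induction vars with
  | nil => intro sb h; simp [pvCons] at h
  | cons v vs ih =>
    intro sb h
    simp only [pvCons] at h
    cases hv : fixed.get? v with
    | some b =>
      rw [hv] at h
      rcases List.mem_cons.1 h with h1 | h1
      · subst h1; simp
      · exact Nat.lt_succ_of_lt (ih sb h1)
    | none => rw [hv] at h; exact Nat.lt_succ_of_lt (ih sb h)

-- matching only looks at bits below L, so a high part does not change it
theorem pvMatch_high (c L r : Nat) (hr : r < 2 ^ L) :
    ∀ (cons : List (Nat × Int)), (∀ sb ∈ cons, sb.1 < L) →
      pvMatch (c * 2 ^ L + r) cons = pvMatch r cons := by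
  intro cons
  induction cons with
  | nil => intro _; rfl
  | cons sb rest ih =>
    intro hs
    simp only [pvMatch, List.all_cons] at *
    rw [pvBit c L sb.1 r (hs sb (by simp)) hr, ih (fun x hx => hs x (by simp [hx]))]

-- the free-variable count of a term over vars
def pvFc (fixed : PySem.Dict String Int) (vars : List String) : Nat :=
  (vars.filter (fun v => !(fixed.contains v))).length

theorem pvFc_cons (fixed : PySem.Dict String Int) (v : String) (vs : List String) :
    pvFc fixed (v :: vs)
      = if (fixed.get? v).isSome then pvFc fixed vs else pvFc fixed vs + 1 := by
  unfold pvFc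
  rw [List.filter_cons]
  cases h : fixed.get? v with
  | some b =>
    have hc : fixed.contains v = true := by rw [PySem.Dict.contains_eq_isSome_get?, h]; rfl
    simp [hc]
  | none =>
    have hc : fixed.contains v = false := by rw [PySem.Dict.contains_eq_isSome_get?, h]; rfl
    simp [hc]

-- forward: every combo value is a minterm below 2^n matching the constraints
theorem pvFwd (fixed : PySem.Dict String Int)
    (h01 : ∀ k x, fixed.get? k = some x → x = 0 ∨ x = 1) :
    ∀ (vars : List String) (i : Nat), ∃ m : Nat,
      pvVal fixed vars (pvComboList (pvFc fixed vars) i) = (m : Int)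
        ∧ m < 2 ^ vars.length ∧ pvMatch m (pvCons fixed vars) = true := by
  intro vars
  induction vars with
  | nil => intro i; exact ⟨0, by simp [pvVal, pvMatch, pvCons]⟩
  | cons v vs ih =>
    intro i
    cases hv : fixed.get? v with
    | some b =>
      obtain ⟨r, hval, hlt, hmatch⟩ := ih i
      have hfc : pvFc fixed (v :: vs) = pvFc fixed vs := by rw [pvFc_cons, hv]; rfl
      refine ⟨b.toNat * 2 ^ vs.length + r, ?_, ?_, ?_⟩
      · simp only [pvVal, hv, hfc, hval]
        rcases h01 v b hv with hb | hb <;> subst hb <;> push_cast <;> ring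
      · have : b.toNat ≤ 1 := by rcases h01 v b hv with hb | hb <;> simp [hb]
        have h2 : 2 ^ (v :: vs).length = 2 * 2 ^ vs.length := by
          simp [List.length_cons, pow_succ]; ring
        rw [h2]; nlinarith
      · have hrest : pvMatch (b.toNat * 2 ^ vs.length + r) (pvCons fixed vs)
            = pvMatch r (pvCons fixed vs) :=
          pvMatch_high _ _ _ hlt _ (pvCons_shift_lt fixed vs)
        simp only [pvCons, hv, pvMatch, List.all_cons, Bool.and_eq_true]
        refine ⟨?_, ?_⟩
        · rw [pvHigh b.toNat vs.length r hlt]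
          rcases h01 v b hv with hb | hb <;> subst hb <;> simp
        · simp only [pvMatch] at hrest hmatch
          rw [hrest]
          exact hmatch
    | none =>
      obtain ⟨r, hval, hlt, hmatch⟩ := ih i
      have hfc : pvFc fixed (v :: vs) = pvFc fixed vs + 1 := by rw [pvFc_cons, hv]; rfl
      set bit := (i >>> pvFc fixed vs) % 2 with hbitdef
      refine ⟨bit * 2 ^ vs.length + r, ?_, ?_, ?_⟩
      · rw [hfc, pvComboList_succ]
        simp only [pvVal, hv, List.headD_cons, List.tail_cons, hval, ← hbitdef]
        rw [Nat.cast_add, Nat.cast_mul, Nat.cast_pow]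
        norm_num
      · have : bit ≤ 1 := by omega
        have h2 : 2 ^ (v :: vs).length = 2 * 2 ^ vs.length := by
          simp [List.length_cons, pow_succ]; ring
        rw [h2]; nlinarith
      · simp only [pvCons, hv]
        rw [pvMatch_high _ _ _ hlt _ (pvCons_shift_lt fixed vs)]
        exact hmatch

-- backward: every matching minterm below 2^n is some combo's value
theorem pvBwd (fixed : PySem.Dict String Int) :
    ∀ (vars : List String) (m : Nat), m < 2 ^ vars.length →
      pvMatch m (pvCons fixed vars) = true →
      ∃ i : Nat, i < 2 ^ pvFc fixed vars
        ∧ pvVal fixed vars (pvComboList (pvFc fixed vars) i) = (m : Int) := by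
  intro vars
  induction vars with
  | nil =>
    intro m hm _
    have : m = 0 := by simpa using hm
    subst this
    exact ⟨0, by simp [pvFc, pvVal]⟩
  | cons v vs ih =>
    intro m hm hmatch
    have h2 : 2 ^ (v :: vs).length = 2 * 2 ^ vs.length := by
      simp [List.length_cons, pow_succ]; ring
    have hpos : 0 < 2 ^ vs.length := Nat.two_pow_pos _
    set h := m / 2 ^ vs.length with hdef
    set r := m % 2 ^ vs.length with rdef
    have hsplit : m = h * 2 ^ vs.length + r := by
      rw [hdef, rdef]; exact (Nat.div_add_mod' m (2 ^ vs.length)).symm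
    have hr : r < 2 ^ vs.length := Nat.mod_lt _ hpos
    have hh : h < 2 := by
      rw [h2] at hm
      apply Nat.div_lt_of_lt_mul
      omega
    have hshift : m >>> vs.length = h := by
      rw [hsplit]; exact pvHigh h vs.length r hr
    cases hv : fixed.get? v with
    | some b =>
      simp only [pvCons, hv, pvMatch, List.all_cons, Bool.and_eq_true] at hmatch
      obtain ⟨hbit, hrest⟩ := hmatch
      rw [hshift] at hbit
      have hb : (h % 2 : Int) = b := by exact_mod_cast (beq_iff_eq.mp hbit)
      have hh2 : h % 2 = h := Nat.mod_eq_of_lt hh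
      rw [hsplit] at hrest
      have hmh := pvMatch_high h vs.length r hr _ (pvCons_shift_lt fixed vs)
      simp only [pvMatch] at hmh
      rw [hmh] at hrest
      obtain ⟨i, hi, hval⟩ := ih r hr hrest
      have hfc : pvFc fixed (v :: vs) = pvFc fixed vs := by rw [pvFc_cons, hv]; rfl
      refine ⟨i, by rw [hfc]; exact hi, ?_⟩
      rw [hfc]
      simp only [pvVal, hv, hval]
      rw [hsplit]
      have hbh : b = (h : Int) := by rw [← hb]; omega
      subst hbh
      push_cast
      ring
    | none =>
      simp only [pvCons, hv] at hmatch
      rw [hsplit] at hmatch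
      rw [show pvMatch (h * 2 ^ vs.length + r) (pvCons fixed vs)
            = pvMatch r (pvCons fixed vs) from
          pvMatch_high _ _ _ hr _ (pvCons_shift_lt fixed vs)] at hmatch
      obtain ⟨i, hi, hval⟩ := ih r hr hmatch
      have hfc : pvFc fixed (v :: vs) = pvFc fixed vs + 1 := by rw [pvFc_cons, hv]; rfl
      refine ⟨h * 2 ^ pvFc fixed vs + i, ?_, ?_⟩
      · rw [hfc, pow_succ]
        nlinarith
      · rw [hfc, pvComboList_succ]
        have hsh : (h * 2 ^ pvFc fixed vs + i) >>> pvFc fixed vs = h :=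
          pvHigh h _ i hi
        have hcl : pvComboList (pvFc fixed vs) (h * 2 ^ pvFc fixed vs + i)
            = pvComboList (pvFc fixed vs) i := by
          unfold pvComboList
          apply List.map_congr_left
          intro k hk
          rw [List.mem_range] at hk
          rw [pvBit h (pvFc fixed vs) _ i (by omega) hi]
        simp only [pvVal, hv, List.headD_cons, List.tail_cons, hsh,
          Nat.mod_eq_of_lt hh, hcl, hval]
        rw [hsplit]
        push_cast
        ring

-- per-term membership: A's expansion list holds exactly the matching minterms
theorem pvTerm_mem (fixed : PySem.Dict String Int)
    (h01 : ∀ k x, fixed.get? k = some x → x = 0 ∨ x = 1)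
    (vars : List String) (x : Int) :
    (x ∈ (pvCombos (pvFc fixed vars)).map
        (fun combo => (pvFull fixed vars combo).foldl (fun m b => m * 2 + b) 0))
      ↔ ∃ m : Nat, m < 2 ^ vars.length ∧ x = (m : Int)
          ∧ pvMatch m (pvCons fixed vars) = true := by
  unfold pvCombos
  rw [List.map_map]
  constructor
  · intro hx
    obtain ⟨i, _, hi⟩ := List.mem_map.1 hx
    obtain ⟨m, hval, hlt, hmatch⟩ := pvFwd fixed h01 vars i
    refine ⟨m, hlt, ?_, hmatch⟩
    rw [← hi]
    simp only [Function.comp_apply]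
    rw [pvFull_foldl, hval]
    ring
  · rintro ⟨m, hlt, rfl, hmatch⟩
    obtain ⟨i, hi, hval⟩ := pvBwd fixed vars m hlt hmatch
    refine List.mem_map.2 ⟨i, List.mem_range.2 hi, ?_⟩
    simp only [Function.comp_apply]
    rw [pvFull_foldl, hval]
    ring

-- ===== VERDICT (by name: the statement is the Claim_ definition above) =====
theorem SOP_to_minterms_spec : Claim_equal_SOP_to_minterms := by
  intro terms vars _
  unfold Spec_SOP_to_minterms SOP_to_minterms SOP_to_minterms_alt
  simp only []
  have h01 : ∀ term : String, ∀ k x,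
      (pvParse term.toList PySem.Dict.empty).get? k = some x → x = 0 ∨ x = 1 := by
    intro term
    apply pvParse_val01
    intro k x h
    rw [PySem.Dict.get?_empty] at h
    exact absurd h (by simp)
  set B := ((List.range (2 ^ vars.length)).filter
      (fun m => (terms.map (fun term =>
          pvCons (pvParse term.toList PySem.Dict.empty) vars)).any
        (fun cons => pvMatch m cons))).map (fun m : Nat => (m : Int)) with hB
  set all := terms.foldl (fun acc term =>
      acc ++ (pvCombos ((vars.filter
          (fun v => !((pvParse term.toList PySem.Dict.empty).contains v))).length)).map
        (fun combo => (pvFull (pvParse term.toList PySem.Dict.empty) vars combo).foldl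
          (fun m b => m * 2 + b) 0)) [] with hall
  have hflat : all = terms.flatMap (fun term =>
      (pvCombos (pvFc (pvParse term.toList PySem.Dict.empty) vars)).map
        (fun combo => (pvFull (pvParse term.toList PySem.Dict.empty) vars combo).foldl
          (fun m b => m * 2 + b) 0)) := by
    rw [hall, PySem.List.foldl_append_eq_flatMap, List.nil_append]
    rfl
  -- same membership
  have hmem : ∀ x : Int, x ∈ all ↔ x ∈ B := by
    intro x
    rw [hflat, List.mem_flatMap, hB]
    constructor
    · rintro ⟨term, hterm, hx⟩
      obtain ⟨m, hlt, rfl, hmatch⟩ := (pvTerm_mem _ (h01 term) vars x).1 hx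
      exact List.mem_map.2 ⟨m, List.mem_filter.2 ⟨List.mem_range.2 hlt,
        List.any_eq_true.2 ⟨pvCons (pvParse term.toList PySem.Dict.empty) vars,
          List.mem_map.2 ⟨term, hterm, rfl⟩, hmatch⟩⟩, rfl⟩
    · intro hx
      obtain ⟨m, hm, rfl⟩ := List.mem_map.1 hx
      obtain ⟨hrange, hany⟩ := List.mem_filter.1 hm
      obtain ⟨cons, hcons, hmatch⟩ := List.any_eq_true.1 hany
      obtain ⟨term, hterm, rfl⟩ := List.mem_map.1 hcons
      exact ⟨term, hterm, (pvTerm_mem _ (h01 term) vars _).2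
        ⟨m, List.mem_range.1 hrange, rfl, hmatch⟩⟩
  -- B is strictly increasing
  have hpw : B.Pairwise (fun a b : Int => a < b) := by
    rw [hB]
    refine List.Pairwise.map _ ?_ (List.Pairwise.filter _ (List.pairwise_lt_range))
    intro a b hab
    exact_mod_cast hab
  -- B is a permutation of the deduplicated all
  have hperm : B.Perm (PySem.Set.ofList all) := by
    rw [List.perm_ext_iff_of_nodup (hpw.imp ne_of_lt) (PySem.Set.nodup_ofList all)]
    intro x
    rw [PySem.Set.mem_ofList, hmem]
  exact PySem.List.sorted_eq_of_perm_of_pairwise_lt (PySem.Set.ofList all) B (fun x => x) hperm hpw
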